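-- pv_equiv track=rewrite | github.com/HojiakbarR-dev/Python_homework | lesson-6/homework/task-6.py | modify_with_underscores
-- ===== SOURCE A (Python) =====
-- def modify_with_underscores(s):
--     vowels = set("aeiouAEIOU")
--     res = []
--     count = 0
--     i = 0
--
--     while i < len(s):
--         res.append(s[i])
--         count += 1
--
--         if count == 3:
--             pos = i  # position where underscore should go
--
--             while pos < len(s) - 1 and s[pos] in vowels:
--                 pos += 1
--
--             if pos < len(s) - 1:
--                 res.append("_")
--                 count = 0
--             else:
--                 count = 0
--
--         i += 1
--
--     if res and res[-1] == "_":
--         res.pop()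
--
--     return "".join(res)
-- ===== SOURCE B (Python) =====
-- def modify_with_underscores(s):
--     vowels = set("aeiouAEIOU")
--     n = len(s)
--     # need[i]: is there a non-vowel somewhere in s[i:n-1]?  (suffix precomputation)
--     need = [False] * (n + 1)
--     for i in range(n - 2, -1, -1):
--         need[i] = (s[i] not in vowels) or need[i + 1]
--     out = []
--     for i, ch in enumerate(s):
--         out.append(ch)
--         if i % 3 == 2 and need[i]:
--             out.append("_")
--     return "".join(out)
-- ===== Notes on version B (the rewrite author's own statement) =====
-- stated objective: faster
-- what changed: Replaces A's inner forward vowel-scan (restarted after every third character, quadratic on vowel runs) with one backward pass precomputing, for each position, whether a non-vowel occurs between it and the second-to-last position, then a single forward pass keyed on the index modulo 3; A's dead trailing-pop is dropped.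
-- intended difference: On strings whose last character is an underscore, A's final trailing-pop (dead code for its own inserted separators, which are never trailing) deletes the input's final underscore, while B keeps it, which is the intended behaviour. — e.g. on modify_with_underscores("ab_"): A returns "ab", B returns "ab_"
import Mathlib
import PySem

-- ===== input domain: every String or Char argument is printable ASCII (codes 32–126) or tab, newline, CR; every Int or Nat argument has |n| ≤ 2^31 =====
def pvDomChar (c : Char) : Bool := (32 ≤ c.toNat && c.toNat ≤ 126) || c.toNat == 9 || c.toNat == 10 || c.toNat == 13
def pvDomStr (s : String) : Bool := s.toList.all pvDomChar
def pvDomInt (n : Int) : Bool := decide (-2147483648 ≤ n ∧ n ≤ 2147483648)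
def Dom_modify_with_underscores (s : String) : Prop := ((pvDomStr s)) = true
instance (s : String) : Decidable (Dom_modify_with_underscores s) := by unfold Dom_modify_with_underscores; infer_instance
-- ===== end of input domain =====

-- B replaces A's quadratic inner vowel-scan with a precomputed "non-vowel exists later" suffix
-- table and a single forward pass; return-value equivalence only (nothing is mutated).

-- ===== PORT A =====
def pvVowels : List Char := ['a','e','i','o','u','A','E','I','O','U']

-- inner `while pos < len(s)-1 and s[pos] in vowels: pos += 1`
-- (fuel = len(s)-1-pos bounds the loop; index always in range when read)
def innerA (cs : List Char) : Nat → Nat → Nat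
  | 0, pos => pos
  | fuel + 1, pos =>
      if pos < cs.length - 1 ∧ pvVowels.contains (cs.getD pos ' ') then innerA cs fuel (pos + 1)
      else pos

-- outer `while i < len(s)` loop, fuel = len(s) - i
def loopA (cs : List Char) : Nat → Nat → Nat → List Char → List Char
  | 0, _, _, res => res
  | fuel + 1, i, count, res =>
      let res1 := res ++ [cs.getD i ' ']
      let count1 := count + 1
      if count1 = 3 then
        let pos := innerA cs (cs.length - 1 - i) i
        if pos < cs.length - 1 then
          loopA cs fuel (i + 1) 0 (res1 ++ ['_'])
        else
          loopA cs fuel (i + 1) 0 res1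
      else
        loopA cs fuel (i + 1) count1 res1

def modify_with_underscores (s : String) : String :=
  let cs := s.toList
  let res := loopA cs cs.length 0 0 []
  let res2 := if res ≠ [] ∧ res.getLast? = some '_' then res.dropLast else res
  String.ofList res2

-- ===== PORT B =====
-- Source B's backward loop filling need[], as structural recursion from the right:
-- needsB cs = [need[0], …, need[n]],  need[i] = (s[i] not a vowel) or need[i+1]  for i ≤ n-2,
-- need[n-1] = need[n] = false.
def needsB : List Char → List Bool
  | [] => [false]
  | [_] => [false, false]
  | c :: rest => (!(pvVowels.contains c) || (needsB rest).headD false) :: needsB rest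

-- Source B's forward pass: at index i append s[i], and '_' when i % 3 == 2 and need[i].
def passB : List Char → List Bool → Nat → List Char
  | [], _, _ => []
  | c :: cs, nd, i =>
      if i % 3 = 2 ∧ nd.headD false = true then c :: '_' :: passB cs nd.tail (i + 1)
      else c :: passB cs nd.tail (i + 1)

def modify_with_underscores_alt (s : String) : String :=
  String.ofList (passB s.toList (needsB s.toList) 0)

-- ===== PRECONDITION & SPEC =====
-- On strings ending in '_' A's final trailing-underscore pop (meant to strip its own inserted
-- separator, which in fact is never trailing) deletes the input's last character, so A returns the
-- modified string with its final '_' dropped while B keeps it, which is the intended behaviour.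
def D_modify_with_underscores (s : String) : Prop := s.toList.getLast? = some '_'
instance (s : String) : Decidable (D_modify_with_underscores s) := by unfold D_modify_with_underscores; infer_instance

def Spec_modify_with_underscores (s : String) (out : String) : Prop :=
  ¬ D_modify_with_underscores s → out = modify_with_underscores_alt s
instance (s : String) (out : String) : Decidable (Spec_modify_with_underscores s out) := by unfold Spec_modify_with_underscores; infer_instance

def pvDiffWitness_modify_with_underscores : String := "ab_"
def pvDiffWitnessOut_modify_with_underscores : String × String := ("ab", "ab_")

-- ===== CLAIM (what is proved, stated in full; the proofs are below) =====
def Claim_unchanged_modify_with_underscores : Prop := ∀ (s : String), Dom_modify_with_underscores s → Spec_modify_with_underscores s (modify_with_underscores s)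
def Claim_changed_modify_with_underscores : Prop := Dom_modify_with_underscores (pvDiffWitness_modify_with_underscores) ∧ D_modify_with_underscores (pvDiffWitness_modify_with_underscores) ∧ modify_with_underscores (pvDiffWitness_modify_with_underscores) = pvDiffWitnessOut_modify_with_underscores.1 ∧ modify_with_underscores_alt (pvDiffWitness_modify_with_underscores) = pvDiffWitnessOut_modify_with_underscores.2 ∧ pvDiffWitnessOut_modify_with_underscores.1 ≠ pvDiffWitnessOut_modify_with_underscores.2
def Claim_exact_modify_with_underscores : Prop := ∀ (s : String), Dom_modify_with_underscores s → D_modify_with_underscores s → modify_with_underscores s ≠ modify_with_underscores_alt s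

-- ===== LEMMAS AND PROOFS =====

-- "a non-vowel exists among all but the last remaining character"
def hasNV (cs : List Char) : Bool := cs.dropLast.any (fun c => !(pvVowels.contains c))

lemma needsB_head (cs : List Char) : (needsB cs).headD false = hasNV cs := by
  match cs with
  | [] => simp [needsB, hasNV]
  | [c] => simp [needsB, hasNV]
  | c :: d :: rest =>
      have ih := needsB_head (d :: rest)
      simp [needsB, hasNV, List.dropLast] at *
      simp [ih]

lemma needsB_tail (cs : List Char) (c : Char) : (needsB (c :: cs)).tail = needsB cs := by
  match cs with
  | [] => simp [needsB]
  | d :: rest => simp [needsB]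

lemma innerA_cond (cs : List Char) (fuel pos : Nat) (hf : cs.length ≤ pos + fuel + 1) :
    decide (innerA cs fuel pos < cs.length - 1) = hasNV (cs.drop pos) := by
  induction fuel generalizing pos with
  | zero =>
      have hshort : (cs.drop pos).length ≤ 1 := by simp [List.length_drop]; omega
      have hdl : (cs.drop pos).dropLast = [] := by
        cases hd : cs.drop pos with
        | nil => simp
        | cons x xs =>
            cases xs with
            | nil => simp
            | cons y ys => rw [hd] at hshort; simp at hshort
      have hnp : ¬ (pos < cs.length - 1) := by omega
      simp [innerA, hasNV, hdl, hnp]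
  | succ n ih =>
      unfold innerA
      by_cases h : pos < cs.length - 1 ∧ pvVowels.contains (cs.getD pos ' ') = true
      · rw [if_pos h]
        have hlt : pos < cs.length := by omega
        have hdrop : cs.drop pos = cs.getD pos ' ' :: cs.drop (pos + 1) := by
          rw [List.getD_eq_getElem cs ' ' hlt]
          exact (List.getElem_cons_drop hlt).symm
        have hlen : (cs.drop (pos + 1)).length ≥ 1 := by simp [List.length_drop]; omega
        have hdl : (cs.getD pos ' ' :: cs.drop (pos + 1)).dropLast
            = cs.getD pos ' ' :: (cs.drop (pos + 1)).dropLast := by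
          cases hd : cs.drop (pos + 1) with
          | nil => rw [hd] at hlen; simp at hlen
          | cons x xs => simp
        rw [ih (pos + 1) (by omega)]
        simp only [hasNV]
        rw [hdrop, hdl]
        simp only [List.any_cons, h.2, Bool.not_true, Bool.false_or]
      · rw [if_neg h]
        rcases Decidable.em (pos < cs.length - 1) with hp | hp
        · -- non-vowel at pos, pos < len - 1 : both sides true
          have hv : pvVowels.contains (cs.getD pos ' ') = false := by
            rcases Bool.eq_false_or_eq_true (pvVowels.contains (cs.getD pos ' ')) with ht | hfv
            · exact absurd ⟨hp, ht⟩ h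
            · exact hfv
          have hlt : pos < cs.length := by omega
          have hdrop : cs.drop pos = cs.getD pos ' ' :: cs.drop (pos + 1) := by
            rw [List.getD_eq_getElem cs ' ' hlt]
            exact (List.getElem_cons_drop hlt).symm
          have hlen : (cs.drop (pos + 1)).length ≥ 1 := by simp [List.length_drop]; omega
          have hdl : (cs.getD pos ' ' :: cs.drop (pos + 1)).dropLast
              = cs.getD pos ' ' :: (cs.drop (pos + 1)).dropLast := by
            cases hd : cs.drop (pos + 1) with
            | nil => rw [hd] at hlen; simp at hlen
            | cons x xs => simp
          simp only [hasNV, hdrop, hdl, List.any_cons, hv, Bool.not_false, Bool.true_or,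
            decide_eq_true_eq]
          omega
        · -- pos ≥ len - 1 : both sides false
          have hshort : (cs.drop pos).length ≤ 1 := by simp [List.length_drop]; omega
          have hdl : (cs.drop pos).dropLast = [] := by
            cases hd : cs.drop pos with
            | nil => simp
            | cons x xs =>
                cases xs with
                | nil => simp
                | cons y ys => rw [hd] at hshort; simp at hshort
          simp [hasNV, hdl, hp]

lemma passB_cons (c : Char) (cs : List Char) (nd : List Bool) (i : Nat) :
    passB (c :: cs) nd i
      = if i % 3 = 2 ∧ nd.headD false = true then c :: '_' :: passB cs nd.tail (i + 1)
        else c :: passB cs nd.tail (i + 1) := rfl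

lemma getLast?_cons_ne (c : Char) (l : List Char) (h : l ≠ []) :
    (c :: l).getLast? = l.getLast? := by
  cases l with
  | nil => simp at h
  | cons a as => simp [List.getLast?_cons_cons]

lemma passB_ne_nil (cs : List Char) (nd : List Bool) (i : Nat) (h : cs ≠ []) :
    passB cs nd i ≠ [] := by
  cases cs with
  | nil => exact absurd rfl h
  | cons c cs' =>
      unfold passB
      split <;> simp

-- main loop invariant: A's outer loop equals B's forward pass on the remaining suffix
lemma loopA_eq_passB (cs : List Char) (fuel i : Nat) (res : List Char)
    (hfuel : fuel = cs.length - i) (hle : i ≤ cs.length) :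
    loopA cs fuel i (i % 3) res = res ++ passB (cs.drop i) (needsB (cs.drop i)) i := by
  induction fuel generalizing i res with
  | zero =>
      have : i = cs.length := by omega
      subst this
      simp [loopA, passB]
  | succ n ih =>
      have hlt : i < cs.length := by omega
      have hdrop : cs.drop i = cs.getD i ' ' :: cs.drop (i + 1) := by
        rw [List.getD_eq_getElem cs ' ' hlt]
        exact (List.getElem_cons_drop hlt).symm
      have hcond : decide (innerA cs (cs.length - 1 - i) i < cs.length - 1)
          = (needsB (cs.drop i)).headD false := by
        rw [innerA_cond cs (cs.length - 1 - i) i (by omega), needsB_head]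
      have htail : (needsB (cs.drop i)).tail = needsB (cs.drop (i + 1)) := by
        rw [hdrop, needsB_tail]
      have hihgen : ∀ r, loopA cs n (i + 1) ((i + 1) % 3) r
          = r ++ passB (cs.drop (i + 1)) (needsB (cs.drop (i + 1))) (i + 1) := by
        intro r; exact ih (i + 1) r (by omega) (by omega)
      have hBstep : ∀ (b : Bool), (needsB (cs.drop i)).headD false = b →
          passB (cs.drop i) (needsB (cs.drop i)) i
            = if i % 3 = 2 ∧ b = true
              then cs.getD i ' ' :: '_' :: passB (cs.drop (i + 1)) (needsB (cs.drop (i + 1))) (i + 1)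
              else cs.getD i ' ' :: passB (cs.drop (i + 1)) (needsB (cs.drop (i + 1))) (i + 1) := by
        intro b hb
        conv_lhs => rw [hdrop]
        rw [passB_cons, ← hdrop, htail, hb]
      by_cases h3 : i % 3 = 2
      · have hc : i % 3 + 1 = 3 := by omega
        have hnext : (i + 1) % 3 = 0 := by omega
        by_cases hu : innerA cs (cs.length - 1 - i) i < cs.length - 1
        · have hnd : (needsB (cs.drop i)).headD false = true := by
            rw [← hcond]; simp [hu]
          simp only [loopA, hc, if_pos hu]
          rw [show (0 : Nat) = (i + 1) % 3 from hnext.symm, hihgen, hBstep true hnd]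
          simp [h3]
        · have hnd : (needsB (cs.drop i)).headD false = false := by
            rw [← hcond]; simp [hu]
          simp only [loopA, hc, if_neg hu]
          rw [show (0 : Nat) = (i + 1) % 3 from hnext.symm, hihgen, hBstep false hnd]
          simp
      · have hc : ¬ (i % 3 + 1 = 3) := by omega
        have hnext : (i + 1) % 3 = i % 3 + 1 := by omega
        simp only [loopA, if_neg hc]
        rw [show i % 3 + 1 = (i + 1) % 3 from hnext.symm, hihgen,
          hBstep ((needsB (cs.drop i)).headD false) rfl, if_neg (fun hx => h3 hx.1)]
        simp

-- the last character of B's output is the last character of the input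
lemma passB_last (cs : List Char) (i : Nat) (h : cs ≠ []) :
    (passB cs (needsB cs) i).getLast? = cs.getLast? := by
  match cs with
  | [c] =>
      have hhd : (needsB [c]).headD false = false := by simp [needsB]
      rw [passB_cons, if_neg (by rw [hhd]; simp)]
      simp [passB]
  | c :: d :: rest =>
      have hne : (d :: rest : List Char) ≠ [] := by simp
      have ih := passB_last (d :: rest) (i + 1) hne
      have hrec : passB (d :: rest) (needsB (d :: rest)) (i + 1) ≠ [] :=
        passB_ne_nil _ _ _ hne
      rw [passB_cons, needsB_tail]
      have hlastin : (c :: d :: rest).getLast? = (d :: rest).getLast? := by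
        simp [List.getLast?_cons_cons]
      split
      · rw [getLast?_cons_ne c _ (by simp), getLast?_cons_ne '_' _ hrec, ih, hlastin]
      · rw [getLast?_cons_ne c _ hrec, ih, hlastin]

-- A's result is B's result with the final-pop rule applied
lemma A_eq_pop_B (s : String) :
    modify_with_underscores s
      = (let res := passB s.toList (needsB s.toList) 0
         String.ofList (if res ≠ [] ∧ res.getLast? = some '_' then res.dropLast else res)) := by
  unfold modify_with_underscores
  have h := loopA_eq_passB s.toList s.toList.length 0 [] (by omega) (by omega)
  simp only [Nat.zero_mod] at h
  simp only [h, List.drop_zero, List.nil_append]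

-- ===== VERDICT (by name: the statement is the Claim_ definition above) =====
theorem modify_with_underscores_spec : Claim_unchanged_modify_with_underscores := by
  intro s _ hD
  unfold D_modify_with_underscores at hD
  rw [A_eq_pop_B]
  unfold modify_with_underscores_alt
  simp only
  rw [if_neg]
  rintro ⟨hp, hl⟩
  by_cases hcs : s.toList = []
  · rw [hcs] at hp; simp [passB] at hp
  · rw [passB_last s.toList 0 hcs] at hl; exact hD hl

theorem modify_with_underscores_changed : Claim_changed_modify_with_underscores := by
  unfold Claim_changed_modify_with_underscores; decide

theorem modify_with_underscores_tight : Claim_exact_modify_with_underscores := by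
  intro s _ hD
  unfold D_modify_with_underscores at hD
  have hne : s.toList ≠ [] := by
    intro h; rw [h] at hD; simp at hD
  rw [A_eq_pop_B]
  unfold modify_with_underscores_alt
  simp only
  have hpne : passB s.toList (needsB s.toList) 0 ≠ [] := passB_ne_nil _ _ _ hne
  have hlast : (passB s.toList (needsB s.toList) 0).getLast? = some '_' := by
    rw [passB_last s.toList 0 hne]; exact hD
  rw [if_pos ⟨hpne, hlast⟩]
  intro hcontra
  have hcl := congrArg String.toList hcontra
  simp only [String.toList_ofList] at hcl
  have hlen := congrArg List.length hcl
  rw [List.length_dropLast] at hlen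
  have hpos : 0 < (passB s.toList (needsB s.toList) 0).length := List.length_pos_of_ne_nil hpne
  omega
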